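-- pv_equiv track=rewrite | github.com/damian-damjanovic-hn/Inventory-Comparison | inventory_reconcile_gui.py | guess_account_key
-- ===== SOURCE A (Python) =====
-- from typing import Optional, Tuple, Dict, List
--
-- ACC_HINTS = ("account", "supplier", "vendor", "sap")
--
-- def guess_account_key(cols: List[str]) -> Optional[str]:
--     for needle in ("account", "supplier_id", "sap_supplier_id", "vendor_id"):
--         for c in cols:
--             if c.lower() == needle:
--                 return c
--     for c in cols:
--         if any(h in c.lower() for h in ACC_HINTS):
--             return c
--     return None
-- ===== SOURCE B (Python) =====
-- from typing import Optional, List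
--
-- ACC_HINTS = ("account", "supplier", "vendor", "sap")
--
-- def _rank(c):
--     # priority of one column: 0..3 exact needle match, 4 substring hint, None otherwise
--     l = c.lower()
--     if l == "account":
--         return 0
--     if l == "supplier_id":
--         return 1
--     if l == "sap_supplier_id":
--         return 2
--     if l == "vendor_id":
--         return 3
--     if any(h in l for h in ACC_HINTS):
--         return 4
--     return None
--
-- def guess_account_key(cols: List[str]) -> Optional[str]:
--     # single pass: keep the first column of strictly minimal rank
--     best = None
--     for c in cols:
--         r = _rank(c)
--         if r is not None and (best is None or r < best[0]):
--             best = (r, c)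
--     return best[1] if best is not None else None
-- ===== Notes on version B (the rewrite author's own statement) =====
-- stated objective: alternative
-- what changed: B makes a single pass over the columns, scoring each with a priority rank (0-3 exact needle, 4 substring hint) and keeping the first column of minimal rank, instead of A's staged scans (one full scan per needle, then a fallback hint scan).
import Mathlib
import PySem

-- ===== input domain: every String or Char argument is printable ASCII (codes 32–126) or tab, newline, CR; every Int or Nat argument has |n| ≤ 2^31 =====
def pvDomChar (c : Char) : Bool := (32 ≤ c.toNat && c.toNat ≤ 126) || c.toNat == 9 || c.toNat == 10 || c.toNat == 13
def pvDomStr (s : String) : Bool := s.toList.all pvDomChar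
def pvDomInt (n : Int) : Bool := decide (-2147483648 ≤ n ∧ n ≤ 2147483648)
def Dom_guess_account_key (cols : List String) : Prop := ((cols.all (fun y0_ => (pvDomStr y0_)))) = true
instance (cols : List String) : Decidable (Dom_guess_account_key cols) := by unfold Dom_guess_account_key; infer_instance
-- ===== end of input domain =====

-- B replaces A's staged scans (one pass per needle, then a hint pass) by a single pass that
-- ranks each column and keeps the first column of minimal rank. (objective: alternative)

-- ===== PORT A =====
-- shared module constant ACC_HINTS
def pvAccHints : List String := ["account", "supplier", "vendor", "sap"]

-- inner 'for c in cols: if c.lower() == needle: return c', then next needle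
def pvNeedleScan : List String → List String → Option String
  | [], _ => none
  | n :: ns, cols =>
    match cols.find? (fun c => PySem.Str.lower c == n) with
    | some c => some c
    | none => pvNeedleScan ns cols

def guess_account_key (cols : List String) : Option String :=
  match pvNeedleScan ["account", "supplier_id", "sap_supplier_id", "vendor_id"] cols with
  | some c => some c
  | none => cols.find? (fun c => pvAccHints.any (fun h => PySem.Str.isIn h (PySem.Str.lower c)))

-- ===== PORT B =====
-- _rank: 0..3 for an exact needle match, 4 for a substring hint, none otherwise
def pvRank (c : String) : Option Nat :=
  let l := PySem.Str.lower c
  if l == "account" then some 0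
  else if l == "supplier_id" then some 1
  else if l == "sap_supplier_id" then some 2
  else if l == "vendor_id" then some 3
  else if pvAccHints.any (fun h => PySem.Str.isIn h l) then some 4
  else none

-- loop body: keep the first column of strictly minimal rank
def pvStep (best : Option (Nat × String)) (c : String) : Option (Nat × String) :=
  match pvRank c with
  | none => best
  | some r =>
    match best with
    | none => some (r, c)
    | some b => if r < b.1 then some (r, c) else best

def guess_account_key_alt (cols : List String) : Option String :=
  (cols.foldl pvStep none).map Prod.snd

-- ===== PRECONDITION & SPEC =====
def Spec_guess_account_key (cols : List String) (out : Option String) : Prop := out = guess_account_key_alt cols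
instance (cols : List String) (out : Option String) : Decidable (Spec_guess_account_key cols out) := by unfold Spec_guess_account_key; infer_instance

-- ===== CLAIM (what is proved, stated in full; the proofs are below) =====
def Claim_equal_guess_account_key : Prop := ∀ (cols : List String), Dom_guess_account_key cols → Spec_guess_account_key cols (guess_account_key cols)

-- ===== LEMMAS AND PROOFS =====

-- left-biased minimum-by-rank merge
def pvMerge : Option (Nat × String) → Option (Nat × String) → Option (Nat × String)
  | none, b => b
  | a, none => a
  | some a, some b => if b.1 < a.1 then some b else some a

-- rank relative to an arbitrary needle list (rank of hints = ns.length)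
def rankG (ns : List String) (c : String) : Option Nat :=
  match ns.findIdx? (fun n => PySem.Str.lower c == n) with
  | some i => some i
  | none =>
    if pvAccHints.any (fun h => PySem.Str.isIn h (PySem.Str.lower c)) then some ns.length else none

-- right-recursive best, with pvRank / with rankG
def pvB : List String → Option (Nat × String)
  | [] => none
  | c :: cs => pvMerge ((pvRank c).map (fun r => (r, c))) (pvB cs)

def pvBG : List String → List String → Option (Nat × String)
  | _, [] => none
  | ns, c :: cs => pvMerge ((rankG ns c).map (fun r => (r, c))) (pvBG ns cs)

lemma pvMerge_none_left (b : Option (Nat × String)) : pvMerge none b = b := by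
  cases b <;> rfl

lemma pvMerge_zero (x : String) (b : Option (Nat × String)) :
    pvMerge (some (0, x)) b = some (0, x) := by
  cases b with
  | none => rfl
  | some p => simp [pvMerge]

lemma pvStep_merge (acc : Option (Nat × String)) (c : String) :
    pvStep acc c = pvMerge acc ((pvRank c).map (fun r => (r, c))) := by
  cases h : pvRank c with
  | none => cases acc <;> simp [pvStep, pvMerge, h]
  | some r =>
    cases acc with
    | none => simp [pvStep, pvMerge, h]
    | some b => by_cases hl : r < b.1 <;> simp [pvStep, pvMerge, h, hl]

lemma pvMerge_assoc (a b c : Option (Nat × String)) :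
    pvMerge (pvMerge a b) c = pvMerge a (pvMerge b c) := by
  rcases a with _ | ⟨ra, xa⟩ <;> rcases b with _ | ⟨rb, xb⟩ <;> rcases c with _ | ⟨rc, xc⟩ <;>
    simp only [pvMerge] <;> split_ifs <;>
    first
      | rfl
      | (simp only [pvMerge] <;> split_ifs <;> first | rfl | (exfalso; omega))

lemma foldl_pvStep (cols : List String) :
    ∀ acc, cols.foldl pvStep acc = pvMerge acc (pvB cols) := by
  induction cols with
  | nil => intro acc; cases acc <;> rfl
  | cons c cs ih =>
    intro acc
    simp only [List.foldl, ih, pvStep_merge, pvMerge_assoc, pvB]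

lemma pvRank_eq_rankG (c : String) :
    pvRank c = rankG ["account", "supplier_id", "sap_supplier_id", "vendor_id"] c := by
  unfold pvRank rankG
  simp only [List.findIdx?_cons, List.findIdx?_nil]
  split_ifs <;> simp_all

lemma pvB_eq_pvBG (cols : List String) :
    pvB cols = pvBG ["account", "supplier_id", "sap_supplier_id", "vendor_id"] cols := by
  induction cols with
  | nil => rfl
  | cons c cs ih => simp only [pvB, pvBG, pvRank_eq_rankG, ih]

-- rank against (n :: ns) shifts by one on columns not matching n
lemma rankG_shift (n : String) (ns : List String) (c : String)
    (h : (PySem.Str.lower c == n) = false) :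
    rankG (n :: ns) c = (rankG ns c).map (· + 1) := by
  unfold rankG
  rw [List.findIdx?_cons, if_neg (by simp [h])]
  cases hf : ns.findIdx? (fun m => PySem.Str.lower c == m) with
  | some i => simp
  | none =>
    by_cases hh : (pvAccHints.any (fun h => PySem.Str.isIn h (PySem.Str.lower c))) = true
    · rw [if_pos hh, if_pos hh]; rfl
    · rw [if_neg hh, if_neg hh]; rfl

-- if some column exactly matches the head needle, the best is the first such column at rank 0
lemma pvBG_head_hit (n : String) (ns : List String) (cols : List String) (c0 : String)
    (h : cols.find? (fun c => PySem.Str.lower c == n) = some c0) :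
    pvBG (n :: ns) cols = some (0, c0) := by
  induction cols with
  | nil => simp at h
  | cons c cs ih =>
    by_cases hc : (PySem.Str.lower c == n) = true
    · rw [List.find?_cons_of_pos (p := fun x => PySem.Str.lower x == n) hc] at h
      injection h with h; subst h
      have hr : rankG (n :: ns) c = some 0 := by
        unfold rankG; rw [List.findIdx?_cons, if_pos hc]
      simp only [pvBG, hr, Option.map_some, pvMerge_zero]
    · rw [List.find?_cons_of_neg (p := fun x => PySem.Str.lower x == n) hc] at h
      have hc' : (PySem.Str.lower c == n) = false := by simpa using hc
      have hrest := ih h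
      simp only [pvBG, hrest, rankG_shift n ns c hc']
      cases hr : rankG ns c with
      | none => simp [pvMerge_none_left]
      | some r => simp [pvMerge]

-- if no column matches the head needle, the whole best shifts by one
lemma pvBG_shift (n : String) (ns : List String) (cols : List String)
    (h : ∀ c ∈ cols, (PySem.Str.lower c == n) = false) :
    pvBG (n :: ns) cols = (pvBG ns cols).map (fun p => (p.1 + 1, p.2)) := by
  induction cols with
  | nil => rfl
  | cons c cs ih =>
    have hc := h c (by simp)
    have hrest := ih (fun x hx => h x (by simp [hx]))
    simp only [pvBG, hrest, rankG_shift n ns c hc]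
    cases hr : rankG ns c with
    | none => simp [pvMerge_none_left]
    | some r =>
      cases hb : pvBG ns cs with
      | none => simp [pvMerge]
      | some b =>
        simp only [Option.map_some, pvMerge]
        by_cases hlt : b.1 < r
        · rw [if_pos hlt, if_pos (by simpa using hlt)]; simp
        · rw [if_neg hlt, if_neg (by simpa using hlt)]; simp

-- the empty-needle case: best = first hint column at rank 0
lemma pvBG_nil_needles (cols : List String) :
    pvBG [] cols =
      (cols.find? (fun c => pvAccHints.any (fun h => PySem.Str.isIn h (PySem.Str.lower c)))).map
        (fun c => (0, c)) := by
  induction cols with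
  | nil => rfl
  | cons c cs ih =>
    by_cases hc : (pvAccHints.any (fun h => PySem.Str.isIn h (PySem.Str.lower c))) = true
    · have hr : rankG [] c = some 0 := by
        unfold rankG
        rw [List.findIdx?_nil]
        show (if (pvAccHints.any (fun h => PySem.Str.isIn h (PySem.Str.lower c))) = true
              then some (List.length ([] : List String)) else none) = some 0
        rw [if_pos hc]
        rfl
      have hfind : List.find? (fun x => pvAccHints.any (fun h => PySem.Str.isIn h (PySem.Str.lower x))) (c :: cs) = some c :=
        List.find?_cons_of_pos hc
      rw [hfind]
      simp only [pvBG, hr, Option.map_some, pvMerge_zero]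
    · have hr : rankG [] c = none := by
        unfold rankG
        rw [List.findIdx?_nil]
        show (if (pvAccHints.any (fun h => PySem.Str.isIn h (PySem.Str.lower c))) = true
              then some (List.length ([] : List String)) else none) = none
        rw [if_neg hc]
      have hfind : List.find? (fun x => pvAccHints.any (fun h => PySem.Str.isIn h (PySem.Str.lower x))) (c :: cs)
          = List.find? (fun x => pvAccHints.any (fun h => PySem.Str.isIn h (PySem.Str.lower x))) cs :=
        List.find?_cons_of_neg hc
      rw [hfind]
      simp only [pvBG, hr, Option.map_none, pvMerge_none_left, ih]

-- the main characterization: A's staged scans = best-by-rank, for any needle list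
lemma scans_eq_best (ns : List String) : ∀ cols : List String,
    (match pvNeedleScan ns cols with
     | some c => some c
     | none => cols.find? (fun c => pvAccHints.any (fun h => PySem.Str.isIn h (PySem.Str.lower c)))) =
    (pvBG ns cols).map Prod.snd := by
  induction ns with
  | nil =>
    intro cols
    simp only [pvNeedleScan, pvBG_nil_needles, Option.map_map]
    cases cols.find? (fun c => pvAccHints.any (fun h => PySem.Str.isIn h (PySem.Str.lower c))) <;> rfl
  | cons n ns ih =>
    intro cols
    cases h : cols.find? (fun c => PySem.Str.lower c == n) with
    | some c0 =>
      simp only [pvNeedleScan, h, pvBG_head_hit n ns cols c0 h, Option.map_some]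
    | none =>
      have hall : ∀ c ∈ cols, (PySem.Str.lower c == n) = false := by
        intro c hc
        have := List.find?_eq_none.mp h c hc
        simpa using this
      have hcomp : (Prod.snd ∘ fun p : Nat × String => (p.1 + 1, p.2)) = Prod.snd := rfl
      simp only [pvNeedleScan, h, pvBG_shift n ns cols hall, Option.map_map, hcomp]
      exact ih cols

-- ===== VERDICT (by name: the statement is the Claim_ definition above) =====
theorem guess_account_key_spec : Claim_equal_guess_account_key := by
  intro cols _
  unfold Spec_guess_account_key guess_account_key guess_account_key_alt
  rw [foldl_pvStep, pvMerge_none_left, pvB_eq_pvBG, ← scans_eq_best]
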